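-- pv_equiv track=rewrite | github.com/pypi-data/pypi-mirror-395 | packages/dsbin/dsbin-0.9.9-py3-none-any.whl/dsbin/text/pycompare.py | count_case_insensitive_matches
-- ===== SOURCE A (Python) =====
-- def count_case_insensitive_matches(
--     list1: list[str],
--     list2: list[str],
--     common_elements: list[str],
-- ) -> int:
--     """Count the number of matches between two lists.
--
--     Counts regardless of case (excluding common elements). Used for reporting what the difference
--     would be if case sensitivity were ignored, in case it affects the results.
--
--     Args:
--         list1: The first list.
--         list2: The second list.
--         common_elements: The list of common elements.
--
--     Returns:
--         The number of additional matches.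
--     """
--     combined_unique = set(list1) | set(list2) - set(common_elements)
--     case_folded = {x.lower() for x in combined_unique}
--     return len(combined_unique) - len(case_folded)
-- ===== SOURCE B (Python) =====
-- def count_case_insensitive_matches(
--     list1: list[str],
--     list2: list[str],
--     common_elements: list[str],
-- ) -> int:
--     """Sort-then-scan: sort the lowercased forms of the combined set and count
--     adjacent equal pairs (each case-collision puts equal keys next to each other)."""
--     combined_unique = set(list1) | set(list2) - set(common_elements)
--     lows = sorted(x.lower() for x in combined_unique)
--     return sum(a == b for a, b in zip(lows, lows[1:]))
-- ===== Notes on version B (the rewrite author's own statement) =====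
-- stated objective: alternative
-- what changed: Instead of materialising the set of lowercased strings and subtracting the two set lengths, B sorts the lowercased forms of the combined set and counts adjacent equal pairs (sort-then-scan vs hash-set counting); the proof shows that in a sorted list the adjacent-equal count equals length minus the number of distinct elements.
import Mathlib
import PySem

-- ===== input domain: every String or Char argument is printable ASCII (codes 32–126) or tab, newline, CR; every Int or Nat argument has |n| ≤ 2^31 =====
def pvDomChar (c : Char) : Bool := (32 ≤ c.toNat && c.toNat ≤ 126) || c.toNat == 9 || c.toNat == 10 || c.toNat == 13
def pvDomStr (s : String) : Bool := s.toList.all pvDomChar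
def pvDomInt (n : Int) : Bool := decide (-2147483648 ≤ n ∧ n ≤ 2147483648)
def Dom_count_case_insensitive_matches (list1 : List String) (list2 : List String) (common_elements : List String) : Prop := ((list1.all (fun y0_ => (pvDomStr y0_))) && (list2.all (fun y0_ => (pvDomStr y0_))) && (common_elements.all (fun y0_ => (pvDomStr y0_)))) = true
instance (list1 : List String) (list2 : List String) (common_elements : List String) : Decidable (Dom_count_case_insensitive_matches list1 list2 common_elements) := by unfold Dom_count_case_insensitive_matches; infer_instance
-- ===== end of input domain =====

-- B replaces A's "build a lowercased set and subtract the two lengths" by a sort-then-scan: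
-- sort the lowercased forms of the combined set and count adjacent equal pairs (alternative
-- algorithm, same result; O(n log n) in principle vs A's O(n)).


-- ===== PORT A =====
def count_case_insensitive_matches (list1 : List String) (list2 : List String) (common_elements : List String) : Int :=
  -- combined_unique = set(list1) | set(list2) - set(common_elements)   ('-' binds tighter)
  let combined_unique : PySem.Set String :=
    PySem.Set.union (PySem.Set.ofList list1)
      (PySem.Set.diff (PySem.Set.ofList list2) (PySem.Set.ofList common_elements))
  -- case_folded = {x.lower() for x in combined_unique}
  let case_folded : PySem.Set String := PySem.Set.ofList (combined_unique.map PySem.Str.lower)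
  PySem.Set.len combined_unique - PySem.Set.len case_folded

-- ===== PORT B =====
def count_case_insensitive_matches_alt (list1 : List String) (list2 : List String) (common_elements : List String) : Int :=
  let combined_unique : PySem.Set String :=
    PySem.Set.union (PySem.Set.ofList list1)
      (PySem.Set.diff (PySem.Set.ofList list2) (PySem.Set.ofList common_elements))
  -- lows = sorted(x.lower() for x in combined_unique)
  let lows : List String :=
    PySem.List.sorted (combined_unique.map PySem.Str.lower) (fun x => x) false
  -- sum(a == b for a, b in zip(lows, lows[1:]))
  ((lows.zip (PySem.List.slice lows (some 1) none)).map
    (fun p => if p.1 == p.2 then (1 : Int) else 0)).sum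

-- ===== PRECONDITION & SPEC =====
def Spec_count_case_insensitive_matches (list1 : List String) (list2 : List String) (common_elements : List String) (out : Int) : Prop := out = count_case_insensitive_matches_alt list1 list2 common_elements
instance (list1 : List String) (list2 : List String) (common_elements : List String) (out : Int) : Decidable (Spec_count_case_insensitive_matches list1 list2 common_elements out) := by unfold Spec_count_case_insensitive_matches; infer_instance

-- ===== CLAIM (what is proved, stated in full; the proofs are below) =====
def Claim_equal_count_case_insensitive_matches : Prop := ∀ (list1 : List String) (list2 : List String) (common_elements : List String), Dom_count_case_insensitive_matches list1 list2 common_elements → Spec_count_case_insensitive_matches list1 list2 common_elements (count_case_insensitive_matches list1 list2 common_elements)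

-- ===== LEMMAS AND PROOFS =====

-- adjacent-equal count of a ≤-sorted list = length - number of distinct elements
theorem pv_adj_sorted (s : List String) (hs : s.Pairwise (· ≤ ·)) :
    ((s.zip s.tail).map (fun p => if p.1 == p.2 then (1 : Int) else 0)).sum
      = (s.length : Int) - (s.dedup.length : Int) := by
  induction s with
  | nil => simp
  | cons a t ih =>
    match t, hs with
    | [], _ => simp
    | b :: u, hs =>
      have hab : a ≤ b := (List.pairwise_cons.mp hs).1 b (by simp)
      have hbu : ∀ c ∈ u, b ≤ c := fun c hc =>
        List.rel_of_pairwise_cons (List.pairwise_cons.mp hs).2 hc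
      have ih' := ih (List.pairwise_cons.mp hs).2
      by_cases hab' : a = b
      · have hmem : a ∈ b :: u := by simp [hab']
        rw [List.dedup_cons_of_mem hmem]
        simp only [List.tail_cons, List.zip_cons_cons, List.map_cons, List.sum_cons, List.length_cons] at ih' ⊢
        rw [if_pos (by simp [hab']), ih']
        have : (b :: u).dedup.length ≤ (b :: u).length := (b :: u).dedup_sublist.length_le
        push_cast
        omega
      · have hmem : a ∉ b :: u := by
          intro h
          rcases List.mem_cons.mp h with h | h
          · exact hab' h
          · exact hab' (le_antisymm hab (hbu a h))
        rw [List.dedup_cons_of_notMem hmem]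
        simp only [List.tail_cons, List.zip_cons_cons, List.map_cons, List.sum_cons, List.length_cons] at ih' ⊢
        rw [if_neg (by simpa using hab'), ih']
        push_cast
        omega

-- distinct-count of a list: PySem.Set.ofList and Mathlib's dedup have the same length
theorem pv_ofList_length_eq_dedup (l : List String) :
    (PySem.Set.ofList l).length = l.dedup.length := by
  have hperm : (PySem.Set.ofList l).Perm l.dedup := by
    rw [List.perm_ext_iff_of_nodup (PySem.Set.nodup_ofList l) l.nodup_dedup]
    intro x
    simp [PySem.Set.mem_ofList, List.mem_dedup]
  exact hperm.length_eq

-- the whole equality, stated over the combined set as one list variable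
theorem pv_main (C : List String) :
    PySem.Set.len C - PySem.Set.len (PySem.Set.ofList (C.map PySem.Str.lower))
      = (((PySem.List.sorted (C.map PySem.Str.lower) (fun x => x) false).zip
            (PySem.List.sorted (C.map PySem.Str.lower) (fun x => x) false).tail).map
          (fun p => if p.1 == p.2 then (1 : Int) else 0)).sum := by
  set l : List String := C.map PySem.Str.lower with hl
  set s : List String := PySem.List.sorted l (fun x => x) false with hs
  have hpair : s.Pairwise (· ≤ ·) := by
    simpa using PySem.List.sorted_pairwise l (fun x => x)
  rw [pv_adj_sorted s hpair]
  have hlen : s.length = l.length := (PySem.List.sorted_perm l (fun x => x) false).length_eq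
  have hded : s.dedup.length = l.dedup.length :=
    ((PySem.List.sorted_perm l (fun x => x) false).dedup).length_eq
  simp only [PySem.Set.len, pv_ofList_length_eq_dedup, hlen, hded]
  simp [hl]

-- ===== VERDICT (by name: the statement is the Claim_ definition above) =====
theorem count_case_insensitive_matches_spec : Claim_equal_count_case_insensitive_matches := by
  intro list1 list2 common_elements _
  unfold Spec_count_case_insensitive_matches
  simp only [count_case_insensitive_matches, count_case_insensitive_matches_alt,
    PySem.List.slice_from_one]
  exact pv_main _
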